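-- pv_equiv track=rewrite | github.com/ludojantzen/HxF | Source/Utilities.py | get_domain_candidates
-- ===== SOURCE A (Python) =====
-- def get_domain_candidates(nnodes, max_domains):
--     candidates = []
--     def generate_combinations(index, product, combination):
--         if index == len(max_domains):
--             if product == nnodes:
--                 candidates.append(combination)
--             return
--         for i in range(1, max_domains[index]+1):
--             if product * i > nnodes:
--                 break
--             generate_combinations(index+1, product*i, combination+[i])
--     generate_combinations(0, 1, [])
--     return candidates
-- ===== SOURCE B (Python) =====
-- def get_domain_candidates(nnodes, max_domains):
--     # Iterative breadth-first construction: one flat list of partial states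
--     # (remaining quotient, combination so far), rewritten once per position.
--     states = [(nnodes, [])]
--     for m in max_domains:
--         states = [(rem // d, combo + [d])
--                   for (rem, combo) in states
--                   for d in range(1, min(m, rem) + 1)
--                   if rem % d == 0]
--     return [combo for (rem, combo) in states if rem == 1]
-- ===== Notes on version B (the rewrite author's own statement) =====
-- stated objective: alternative
-- what changed: A recursively multiplies up a running product and breaks once it exceeds nnodes; B iterates over positions with a fold, maintaining a flat list of (remaining quotient, combination) states and rewriting it via a comprehension that keeps only divisors of the remaining quotient, then filters the finished states with remaining == 1.
import Mathlib
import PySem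

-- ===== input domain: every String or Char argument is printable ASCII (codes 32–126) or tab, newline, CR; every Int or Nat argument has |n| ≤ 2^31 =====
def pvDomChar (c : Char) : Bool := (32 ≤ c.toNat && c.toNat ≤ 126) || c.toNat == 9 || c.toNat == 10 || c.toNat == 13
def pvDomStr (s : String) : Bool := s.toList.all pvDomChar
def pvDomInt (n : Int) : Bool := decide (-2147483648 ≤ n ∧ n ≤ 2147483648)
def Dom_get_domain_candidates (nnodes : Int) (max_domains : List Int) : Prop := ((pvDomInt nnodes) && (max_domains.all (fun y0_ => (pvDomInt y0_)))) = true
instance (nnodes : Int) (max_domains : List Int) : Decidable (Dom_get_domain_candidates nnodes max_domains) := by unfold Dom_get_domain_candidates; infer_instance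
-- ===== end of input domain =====

-- B replaces A's recursive multiply-and-break backtracking by an iterative breadth-first
-- fold over the positions, keeping a flat list of (remaining quotient, combination) states
-- and extending only with divisors of the remaining quotient (objective: alternative).

-- ===== PORT A =====
-- generate_combinations(index, product, combination): index walks max_domains, so it is the
-- structural recursion on the remaining suffix of max_domains; the `for i in range(1, m+1)`
-- with `break` is the inner recursion pvLoopA over the range list.
mutual
def pvGenA (nnodes : Int) : List Int → Int → List Int → List (List Int)
  | [], product, comb => if product = nnodes then [comb] else []
  | m :: rest, product, comb => pvLoopA nnodes rest product comb (PySem.List.pyRange 1 (m + 1) 1)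
  termination_by ms _ _ => (ms.length, 0)

def pvLoopA (nnodes : Int) (rest : List Int) (product : Int) (comb : List Int) : List Int → List (List Int)
  | [] => []
  | i :: is =>
      if product * i > nnodes then []
      else pvGenA nnodes rest (product * i) (comb ++ [i]) ++ pvLoopA nnodes rest product comb is
  termination_by L => (rest.length, L.length + 1)
end

def get_domain_candidates (nnodes : Int) (max_domains : List Int) : List (List Int) :=
  pvGenA nnodes max_domains 1 []

-- ===== PORT B =====
-- The for-loop over max_domains is a foldl over a flat state list; each comprehension
-- (nested generators + filter clause) is flatMap / flatMap / if-then-singleton-else-empty;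
-- the final comprehension filtering finished states is a filterMap.
def get_domain_candidates_alt (nnodes : Int) (max_domains : List Int) : List (List Int) :=
  let states := max_domains.foldl
    (fun states m =>
      states.flatMap (fun s =>
        (PySem.List.pyRange 1 (min m s.1 + 1) 1).flatMap (fun d =>
          if PySem.Int.mod s.1 d = 0
          then [(PySem.Int.floordiv s.1 d, s.2 ++ [d])]
          else [])))
    [(nnodes, ([] : List Int))]
  states.filterMap (fun s => if s.1 = 1 then some s.2 else none)

-- ===== PRECONDITION & SPEC =====
def Spec_get_domain_candidates (nnodes : Int) (max_domains : List Int) (out : List (List Int)) : Prop := out = get_domain_candidates_alt nnodes max_domains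
instance (nnodes : Int) (max_domains : List Int) (out : List (List Int)) : Decidable (Spec_get_domain_candidates nnodes max_domains out) := by unfold Spec_get_domain_candidates; infer_instance

-- ===== CLAIM (what is proved, stated in full; the proofs are below) =====
def Claim_equal_get_domain_candidates : Prop := ∀ (nnodes : Int) (max_domains : List Int), Dom_get_domain_candidates nnodes max_domains → Spec_get_domain_candidates nnodes max_domains (get_domain_candidates nnodes max_domains)

-- ===== LEMMAS AND PROOFS =====

-- Proof-only intermediate: divisor-pruned DFS on the suffix (used to bridge A's recursion
-- with B's fold; neither port mentions it).
mutual
def pvGenM : List Int → Int → List Int → List (List Int)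
  | [], remaining, comb => if remaining = 1 then [comb] else []
  | m :: rest, remaining, comb => pvLoopM rest remaining comb (PySem.List.pyRange 1 (min m remaining + 1) 1)
  termination_by ms _ _ => (ms.length, 0)

def pvLoopM (rest : List Int) (remaining : Int) (comb : List Int) : List Int → List (List Int)
  | [] => []
  | d :: ds =>
      (if PySem.Int.mod remaining d = 0
       then pvGenM rest (PySem.Int.floordiv remaining d) (comb ++ [d]) else []) ++
      pvLoopM rest remaining comb ds
  termination_by L => (rest.length, L.length + 1)
end

-- A's loop with break is flatMap over the takeWhile prefix.
theorem pvLoopA_eq (nnodes : Int) (rest : List Int) (product : Int) (comb : List Int)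
    (L : List Int) :
    pvLoopA nnodes rest product comb L =
      (L.takeWhile (fun i => decide (product * i ≤ nnodes))).flatMap
        (fun i => pvGenA nnodes rest (product * i) (comb ++ [i])) := by
  induction L with
  | nil => simp [pvLoopA]
  | cons i is ih =>
      by_cases h : product * i > nnodes
      · simp [pvLoopA, h, not_le.mpr h]
      · simp [pvLoopA, h, not_lt.mp h, ih]

-- The intermediate's loop with the divisibility filter is flatMap over the filtered list.
theorem pvLoopM_eq (rest : List Int) (remaining : Int) (comb : List Int) (L : List Int) :
    pvLoopM rest remaining comb L =
      (L.filter (fun d => decide (PySem.Int.mod remaining d = 0))).flatMap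
        (fun d => pvGenM rest (PySem.Int.floordiv remaining d) (comb ++ [d])) := by
  induction L with
  | nil => simp [pvLoopM]
  | cons d ds ih =>
      by_cases h : PySem.Int.mod remaining d = 0
      · simp [pvLoopM, h, ih]
      · simp [pvLoopM, h, ih]

-- If the accumulated product does not divide nnodes, A's recursion can never reach it.
theorem pvGenA_nil_of_not_dvd (nnodes : Int) (ms : List Int) :
    ∀ (product : Int) (comb : List Int), 1 ≤ product → ¬ (product ∣ nnodes) →
      pvGenA nnodes ms product comb = [] := by
  induction ms with
  | nil =>
      intro product comb _ hnd
      simp only [pvGenA, ite_eq_right_iff]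
      intro he; exact absurd (he ▸ dvd_refl product) hnd
  | cons m rest ih =>
      intro product comb hp hnd
      rw [pvGenA, pvLoopA_eq]
      apply List.flatMap_eq_nil_iff.mpr
      intro i hi
      have hi' : i ∈ PySem.List.pyRange 1 (m + 1) 1 :=
        List.Sublist.mem hi (List.takeWhile_sublist _)
      have h1 : (1 : Int) ≤ i := ((PySem.List.mem_pyRange_one).mp hi').1
      refine ih (product * i) (comb ++ [i]) (by nlinarith) ?_
      intro hdvd
      exact hnd (dvd_trans ⟨i, rfl⟩ hdvd)

-- takeWhile (· ≤ r) on an ascending range is the truncated range.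
theorem takeWhile_pyRange (r : Int) : ∀ (a b : Int),
    (PySem.List.pyRange a b 1).takeWhile (fun i => decide (i ≤ r)) =
      PySem.List.pyRange a (min b (r + 1)) 1 := by
  intro a b
  by_cases hab : b ≤ a
  · rw [PySem.List.pyRange_one_eq_nil hab, PySem.List.pyRange_one_eq_nil (by omega)]
    rfl
  · push Not at hab
    have : ∀ (k : Nat) (a : Int), b - a ≤ (k : Int) → a < b →
        (PySem.List.pyRange a b 1).takeWhile (fun i => decide (i ≤ r)) =
          PySem.List.pyRange a (min b (r + 1)) 1 := by
      intro k
      induction k with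
      | zero => intro a h1 h2; omega
      | succ k ihk =>
          intro a h1 h2
          rw [PySem.List.pyRange_one_cons h2, List.takeWhile_cons]
          by_cases har : a ≤ r
          · simp only [har, decide_true]
            by_cases h3 : a + 1 < b
            · rw [ihk (a + 1) (by omega) h3,
                PySem.List.pyRange_one_cons (show a < min b (r + 1) by omega)]
              simp
            · rw [PySem.List.pyRange_one_eq_nil (show b ≤ a + 1 by omega), List.takeWhile_nil,
                PySem.List.pyRange_one_cons (show a < min b (r + 1) by omega),
                PySem.List.pyRange_one_eq_nil (show min b (r + 1) ≤ a + 1 by omega)]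
              simp
          · simp only [har, decide_false]
            rw [PySem.List.pyRange_one_eq_nil (show min b (r + 1) ≤ a by omega)]
            simp
    exact this (b - a).toNat a (by omega) hab

-- flatMap over a list equals flatMap over its filtered part when dropped elements yield [].
theorem flatMap_filter_eq {α β : Type} (p : α → Bool) (f g : α → List β) (L : List α)
    (h : ∀ x ∈ L, if p x then f x = g x else f x = []) :
    L.flatMap f = (L.filter p).flatMap g := by
  induction L with
  | nil => rfl
  | cons x xs ih =>
      have hx := h x (List.mem_cons_self)
      have ih' := ih (fun y hy => h y (List.mem_cons_of_mem _ hy))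
      by_cases hp : p x = true
      · simp only [hp, if_true] at hx
        simp [hp, hx, ih']
      · simp only [Bool.not_eq_true] at hp
        simp only [hp, Bool.false_eq_true, if_false] at hx
        simp [hp, hx, ih']

-- A from product equals the divisor-pruned DFS from the remaining quotient.
theorem pvGenA_eq_pvGenM (nnodes : Int) (ms : List Int) :
    ∀ (product remaining : Int) (comb : List Int), 1 ≤ product →
      product * remaining = nnodes →
      pvGenA nnodes ms product comb = pvGenM ms remaining comb := by
  induction ms with
  | nil =>
      intro product remaining comb hp hpr
      have : product = nnodes ↔ remaining = 1 := by
        constructor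
        · intro h; nlinarith [h ▸ hpr]
        · intro h; simpa [h] using hpr
      simp only [pvGenA, pvGenM]
      by_cases h : remaining = 1
      · rw [if_pos (this.mpr h), if_pos h]
      · rw [if_neg (fun hh => h (this.mp hh)), if_neg h]
  | cons m rest ih =>
      intro product remaining comb hp hpr
      rw [pvGenA, pvGenM, pvLoopA_eq, pvLoopM_eq]
      have hpred : (fun i : Int => decide (product * i ≤ nnodes)) =
          (fun i : Int => decide (i ≤ remaining)) := by
        funext i
        have : product * i ≤ nnodes ↔ i ≤ remaining := by
          rw [← hpr]; exact mul_le_mul_iff_of_pos_left (by omega)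
        simp [this]
      rw [hpred, takeWhile_pyRange remaining 1 (m + 1),
        show min (m + 1) (remaining + 1) = min m remaining + 1 by omega]
      apply flatMap_filter_eq
      intro d hd
      have hdmem := (PySem.List.mem_pyRange_one).mp hd
      have hd1 : (1 : Int) ≤ d := hdmem.1
      have hdr : d ≤ remaining := by omega
      by_cases hdvd : d ∣ remaining
      · have hmod : PySem.Int.mod remaining d = 0 :=
          (PySem.Int.mod_eq_zero_iff_dvd remaining d).mpr hdvd
        simp only [hmod, decide_true, if_true]
        have hfd : PySem.Int.floordiv remaining d = remaining / d :=
          PySem.Int.floordiv_eq_ediv_of_pos (by omega)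
        refine ih (product * d) (PySem.Int.floordiv remaining d) (comb ++ [d])
          (by nlinarith) ?_
        rw [hfd, mul_assoc, Int.mul_ediv_cancel' hdvd, hpr]
      · have hmod : PySem.Int.mod remaining d ≠ 0 :=
          fun h => hdvd ((PySem.Int.mod_eq_zero_iff_dvd remaining d).mp h)
        simp only [hmod, decide_false]
        refine pvGenA_nil_of_not_dvd nnodes rest (product * d) (comb ++ [d])
          (by nlinarith) ?_
        intro hdvd2
        rcases hdvd2 with ⟨c, hc⟩
        refine hdvd ⟨c, ?_⟩
        have : product * remaining = product * (d * c) := by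
          rw [hpr, hc]; ring
        have := mul_left_cancel₀ (show product ≠ 0 by omega) this
        omega

-- B's one fold step, named for the proofs.
def pvStepB (states : List (Int × List Int)) (m : Int) : List (Int × List Int) :=
  states.flatMap (fun s =>
    (PySem.List.pyRange 1 (min m s.1 + 1) 1).flatMap (fun d =>
      if PySem.Int.mod s.1 d = 0
      then [(PySem.Int.floordiv s.1 d, s.2 ++ [d])]
      else []))

-- Running the DFS from every state produced by one step of the fold = one DFS level.
theorem flatMap_step_inner (rest : List Int) (remaining : Int) (comb : List Int)
    (L : List Int) :
    (L.flatMap (fun d =>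
        if PySem.Int.mod remaining d = 0
        then [(PySem.Int.floordiv remaining d, comb ++ [d])]
        else [])).flatMap (fun s => pvGenM rest s.1 s.2) =
      pvLoopM rest remaining comb L := by
  induction L with
  | nil => simp [pvLoopM]
  | cons d ds ih =>
      by_cases h : PySem.Int.mod remaining d = 0
      · simp [pvLoopM, h, ih]
      · simp [pvLoopM, h, ih]

-- Main bridge: finishing the fold and filtering equals running the DFS from each state.
theorem foldl_step_eq (ms : List Int) :
    ∀ (S : List (Int × List Int)),
      (ms.foldl pvStepB S).filterMap (fun s => if s.1 = 1 then some s.2 else none) =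
        S.flatMap (fun s => pvGenM ms s.1 s.2) := by
  induction ms with
  | nil =>
      intro S
      induction S with
      | nil => simp
      | cons s S ihS =>
          by_cases h : s.1 = 1
          · simp [List.foldl, pvGenM, h] at ihS ⊢; exact ihS
          · simp [List.foldl, pvGenM, h] at ihS ⊢; exact ihS
  | cons m rest ih =>
      intro S
      rw [List.foldl_cons, ih (pvStepB S m), pvStepB, List.flatMap_assoc]
      apply List.flatMap_congr
      intro s _
      rw [flatMap_step_inner, pvGenM]

-- ===== VERDICT (by name: the statement is the Claim_ definition above) =====
theorem get_domain_candidates_spec : Claim_equal_get_domain_candidates := by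
  intro nnodes max_domains _
  unfold Spec_get_domain_candidates get_domain_candidates get_domain_candidates_alt
  show pvGenA nnodes max_domains 1 [] =
    (max_domains.foldl pvStepB [(nnodes, ([] : List Int))]).filterMap
      (fun s => if s.1 = 1 then some s.2 else none)
  rw [foldl_step_eq]
  simp only [List.flatMap_cons, List.flatMap_nil, List.append_nil]
  exact pvGenA_eq_pvGenM nnodes max_domains 1 nnodes [] le_rfl (one_mul nnodes)
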